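-- pv_equiv track=rewrite | github.com/hoprnet/ct-research | ct-app/economic_handler/economic_handler.py | block_rpch_nodes
-- ===== SOURCE A (Python) =====
-- def block_rpch_nodes(
--     blacklist_rpch_nodes: list, merged_metrics_subgraph_topology: dict
-- ):
--     """
--     Removes RPCh entry and exit nodes from the dictioanry that
--     contains the merged results of database metrics, subgraph, and topology.
--     :param: blacklist_rpch_nodes (list): Containing a list of RPCh nodes
--     :param: merged_metrics_subgraph_topology (dict): merged data
--     :returns: (dict): Updated merged_metrics_subgraph_topology dataset
--     """
--     merged_metrics_subgraph_topology = {
--         k: v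
--         for k, v in merged_metrics_subgraph_topology.items()
--         if k not in blacklist_rpch_nodes
--     }
--     return "dict_excluding_rpch_nodes", merged_metrics_subgraph_topology
-- ===== SOURCE B (Python) =====
-- def block_rpch_nodes(
--     blacklist_rpch_nodes: list, merged_metrics_subgraph_topology: dict
-- ):
--     result = dict(merged_metrics_subgraph_topology)
--     for node in blacklist_rpch_nodes:
--         result.pop(node, None)
--     return "dict_excluding_rpch_nodes", result
-- ===== Notes on version B (the rewrite author's own statement) =====
-- stated objective: faster
-- what changed: B copies the dict and pops each blacklisted key from the copy (one O(1) dict removal per blacklist entry) instead of rebuilding the dict with a list-membership test per item.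
import Mathlib
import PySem

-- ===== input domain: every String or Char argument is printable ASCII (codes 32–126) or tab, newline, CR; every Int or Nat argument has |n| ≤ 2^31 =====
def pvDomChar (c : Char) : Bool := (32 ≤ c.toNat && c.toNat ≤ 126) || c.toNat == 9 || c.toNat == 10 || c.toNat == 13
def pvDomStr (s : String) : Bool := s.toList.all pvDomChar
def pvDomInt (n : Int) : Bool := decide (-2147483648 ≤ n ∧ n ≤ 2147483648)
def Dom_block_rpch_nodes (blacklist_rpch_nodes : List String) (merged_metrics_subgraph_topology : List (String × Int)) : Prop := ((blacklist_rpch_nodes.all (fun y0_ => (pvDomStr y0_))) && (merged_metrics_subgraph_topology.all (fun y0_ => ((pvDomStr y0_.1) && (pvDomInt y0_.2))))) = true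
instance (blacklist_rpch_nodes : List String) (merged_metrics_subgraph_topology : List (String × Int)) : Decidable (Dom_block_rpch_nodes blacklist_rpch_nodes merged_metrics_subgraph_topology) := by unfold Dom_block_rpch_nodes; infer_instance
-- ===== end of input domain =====

-- B removes the blacklisted keys by popping each one from a copy of the dict instead of rebuilding the dict with a per-item membership test (faster: O(1) removal per blacklist entry).
-- ===== PORT A =====
-- A: dict comprehension keeping items whose key is not in the blacklist.
def block_rpch_nodes (blacklist_rpch_nodes : List String) (merged_metrics_subgraph_topology : List (String × Int)) : String × (List (String × Int)) :=
  ("dict_excluding_rpch_nodes",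
    merged_metrics_subgraph_topology.filter (fun kv => !(blacklist_rpch_nodes.contains kv.1)))

-- ===== PORT B =====
-- B: copy the dict, then pop each blacklisted node from the copy.
-- result.pop(node, None) removes the entry keyed node; on the association-list
-- representation of a dict (one entry per key) removing every entry keyed node is exact.
def pyPop (result : List (String × Int)) (node : String) : List (String × Int) :=
  result.filter (fun kv => kv.1 != node)

def block_rpch_nodes_alt (blacklist_rpch_nodes : List String) (merged_metrics_subgraph_topology : List (String × Int)) : String × (List (String × Int)) :=
  ("dict_excluding_rpch_nodes", blacklist_rpch_nodes.foldl pyPop merged_metrics_subgraph_topology)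

-- ===== PRECONDITION & SPEC =====
def Spec_block_rpch_nodes (blacklist_rpch_nodes : List String) (merged_metrics_subgraph_topology : List (String × Int)) (out : String × (List (String × Int))) : Prop := out = block_rpch_nodes_alt blacklist_rpch_nodes merged_metrics_subgraph_topology
instance (blacklist_rpch_nodes : List String) (merged_metrics_subgraph_topology : List (String × Int)) (out : String × (List (String × Int))) : Decidable (Spec_block_rpch_nodes blacklist_rpch_nodes merged_metrics_subgraph_topology out) := by unfold Spec_block_rpch_nodes; infer_instance

-- ===== CLAIM (what is proved, stated in full; the proofs are below) =====
def Claim_equal_block_rpch_nodes : Prop := ∀ (blacklist_rpch_nodes : List String) (merged_metrics_subgraph_topology : List (String × Int)), Dom_block_rpch_nodes blacklist_rpch_nodes merged_metrics_subgraph_topology → Spec_block_rpch_nodes blacklist_rpch_nodes merged_metrics_subgraph_topology (block_rpch_nodes blacklist_rpch_nodes merged_metrics_subgraph_topology)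

-- ===== LEMMAS AND PROOFS =====
-- Popping each blacklist node in turn filters the list by "key not in blacklist".
theorem foldl_pyPop_eq_filter (bl : List String) (m : List (String × Int)) :
    bl.foldl pyPop m = m.filter (fun kv => !(bl.contains kv.1)) := by
  induction bl generalizing m with
  | nil => simp
  | cons b bs ih =>
    simp only [List.foldl_cons, ih, pyPop, List.filter_filter]
    apply List.filter_congr
    intro kv _
    by_cases h : kv.1 = b <;> simp [h, bne]

-- ===== VERDICT (by name: the statement is the Claim_ definition above) =====
theorem block_rpch_nodes_spec : Claim_equal_block_rpch_nodes := by
  intro bl m _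
  unfold Spec_block_rpch_nodes block_rpch_nodes block_rpch_nodes_alt
  rw [foldl_pyPop_eq_filter]
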